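-- pv_equiv track=rewrite | github.com/mehdimerbah/BioinfoScripting | final_project/rosalind_scripts/reverse_translation.py | aaToCodonList
-- ===== SOURCE A (Python) =====
-- def aaToCodonList(Protein):
--   """
--   This method generates a list of codons given an amino acid sequence.
--   """
--   trans_map = {"UUU":"F", "UUC":"F", "UUA":"L", "UUG":"L",
--      "UCU":"S", "UCC":"S", "UCA":"S", "UCG":"S",
--      "UAU":"Y", "UAC":"Y", "UAA":"STOP", "UAG":"STOP",
--      "UGU":"C", "UGC":"C", "UGA":"STOP", "UGG":"W",
--      "CUU":"L", "CUC":"L", "CUA":"L", "CUG":"L",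
--      "CCU":"P", "CCC":"P", "CCA":"P", "CCG":"P",
--      "CAU":"H", "CAC":"H", "CAA":"Q", "CAG":"Q",
--      "CGU":"R", "CGC":"R", "CGA":"R", "CGG":"R",
--      "AUU":"I", "AUC":"I", "AUA":"I", "AUG":"M",
--      "ACU":"T", "ACC":"T", "ACA":"T", "ACG":"T",
--      "AAU":"N", "AAC":"N", "AAA":"K", "AAG":"K",
--      "AGU":"S", "AGC":"S", "AGA":"R", "AGG":"R",
--      "GUU":"V", "GUC":"V", "GUA":"V", "GUG":"V",
--      "GCU":"A", "GCC":"A", "GCA":"A", "GCG":"A",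
--      "GAU":"D", "GAC":"D", "GAA":"E", "GAG":"E",
--      "GGU":"G", "GGC":"G", "GGA":"G", "GGG":"G"}
--
--   # We define a reverse translation dictionary to go from AA to Codon
--   reverse_dict = {}
--   # We initialize the reverse dictionry keys with an amino acid name set
--   aa_keySet = set(trans_map.values())
--   for key in aa_keySet:
--       reverse_dict[key] = []
--
--   # Now we attribute for each amino acid its list of codons
--   for key, val in trans_map.items():
--       reverse_dict[val].append(key)
--
--   # We append our results in a list to use later for getting the cartesian product of the all codon sets
--   aa_list = []
--   for aa in Protein:
--       aa_list.append(reverse_dict[aa])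
--
--
--   return aa_list
-- ===== SOURCE B (Python) =====
-- def aaToCodonList(Protein):
--   """
--   This method generates a list of codons given an amino acid sequence.
--   """
--   # The reverse genetic code written down directly: one space-separated codon
--   # string per amino acid, scanned per residue -- no dictionaries built at all.
--   codon_table = [
--     ("A", "GCU GCC GCA GCG"), ("C", "UGU UGC"), ("D", "GAU GAC"),
--     ("E", "GAA GAG"), ("F", "UUU UUC"), ("G", "GGU GGC GGA GGG"),
--     ("H", "CAU CAC"), ("I", "AUU AUC AUA"), ("K", "AAA AAG"),
--     ("L", "UUA UUG CUU CUC CUA CUG"), ("M", "AUG"), ("N", "AAU AAC"),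
--     ("P", "CCU CCC CCA CCG"), ("Q", "CAA CAG"),
--     ("R", "CGU CGC CGA CGG AGA AGG"), ("S", "UCU UCC UCA UCG AGU AGC"),
--     ("T", "ACU ACC ACA ACG"), ("V", "GUU GUC GUA GUG"),
--     ("W", "UGG"), ("Y", "UAU UAC")]
--   return [[cs for a, cs in codon_table if a == aa][0].split() for aa in Protein]
-- ===== Notes on version B (the rewrite author's own statement) =====
-- stated objective: alternative
-- what changed: B drops A's whole reverse-index construction (trans_map dict, set(values), dict of empty lists, append pass) and instead writes the reverse genetic code down directly as 20 (amino acid, space-separated codon string) pairs, answering each residue by a scan of that table plus a split().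
import Mathlib
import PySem

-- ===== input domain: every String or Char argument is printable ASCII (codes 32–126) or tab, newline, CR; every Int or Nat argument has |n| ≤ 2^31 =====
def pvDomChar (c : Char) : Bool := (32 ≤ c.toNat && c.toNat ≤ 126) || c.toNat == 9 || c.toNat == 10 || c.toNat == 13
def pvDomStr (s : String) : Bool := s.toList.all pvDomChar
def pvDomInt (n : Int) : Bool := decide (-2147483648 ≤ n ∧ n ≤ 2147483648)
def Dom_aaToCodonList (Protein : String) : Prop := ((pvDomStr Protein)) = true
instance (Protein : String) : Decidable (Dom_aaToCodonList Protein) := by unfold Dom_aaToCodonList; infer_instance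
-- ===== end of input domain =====

-- B replaces A's runtime reverse-index construction (codon→aa dict, set of values, dict of empty lists,
-- append pass) by the reverse genetic code written down directly as 20 (aa, codon-string) pairs, scanned
-- per residue and split (alternative decomposition).
-- In Python A, the iteration order of set(trans_map.values()) only determines key order of reverse_dict,
-- never the return value (only lookups are performed on it); the port initialises the keys in
-- first-occurrence order.

-- ===== PORT A =====
def pvTransMap : PySem.Dict String String := PySem.Dict.ofList
  [("UUU","F"), ("UUC","F"), ("UUA","L"), ("UUG","L"),
   ("UCU","S"), ("UCC","S"), ("UCA","S"), ("UCG","S"),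
   ("UAU","Y"), ("UAC","Y"), ("UAA","STOP"), ("UAG","STOP"),
   ("UGU","C"), ("UGC","C"), ("UGA","STOP"), ("UGG","W"),
   ("CUU","L"), ("CUC","L"), ("CUA","L"), ("CUG","L"),
   ("CCU","P"), ("CCC","P"), ("CCA","P"), ("CCG","P"),
   ("CAU","H"), ("CAC","H"), ("CAA","Q"), ("CAG","Q"),
   ("CGU","R"), ("CGC","R"), ("CGA","R"), ("CGG","R"),
   ("AUU","I"), ("AUC","I"), ("AUA","I"), ("AUG","M"),
   ("ACU","T"), ("ACC","T"), ("ACA","T"), ("ACG","T"),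
   ("AAU","N"), ("AAC","N"), ("AAA","K"), ("AAG","K"),
   ("AGU","S"), ("AGC","S"), ("AGA","R"), ("AGG","R"),
   ("GUU","V"), ("GUC","V"), ("GUA","V"), ("GUG","V"),
   ("GCU","A"), ("GCC","A"), ("GCA","A"), ("GCG","A"),
   ("GAU","D"), ("GAC","D"), ("GAA","E"), ("GAG","E"),
   ("GGU","G"), ("GGC","G"), ("GGA","G"), ("GGG","G")]

def aaToCodonList (Protein : String) : List (List String) :=
  let transMap := pvTransMap
  -- aa_keySet = set(trans_map.values()); for key in aa_keySet: reverse_dict[key] = []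
  let aaKeySet : PySem.Set String := PySem.Set.ofList (PySem.Dict.values transMap)
  let reverseDict : PySem.Dict String (List String) :=
    aaKeySet.foldl (fun d k => d.insert k []) PySem.Dict.empty
  -- for key, val in trans_map.items(): reverse_dict[val].append(key)
  let reverseDict :=
    transMap.items.foldl (fun d kv => d.modify kv.2 [] (fun l => l ++ [kv.1])) reverseDict
  -- for aa in Protein: aa_list.append(reverse_dict[aa])   -- KeyError (excluded by Pre_) if aa absent
  Protein.toList.foldl (fun acc aa => acc ++ [reverseDict.getD (String.ofList [aa]) []]) []

-- ===== PORT B =====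
def pvCodonTable : List (String × String) :=
  [("A", "GCU GCC GCA GCG"), ("C", "UGU UGC"), ("D", "GAU GAC"),
   ("E", "GAA GAG"), ("F", "UUU UUC"), ("G", "GGU GGC GGA GGG"),
   ("H", "CAU CAC"), ("I", "AUU AUC AUA"), ("K", "AAA AAG"),
   ("L", "UUA UUG CUU CUC CUA CUG"), ("M", "AUG"), ("N", "AAU AAC"),
   ("P", "CCU CCC CCA CCG"), ("Q", "CAA CAG"),
   ("R", "CGU CGC CGA CGG AGA AGG"), ("S", "UCU UCC UCA UCG AGU AGC"),
   ("T", "ACU ACC ACA ACG"), ("V", "GUU GUC GUA GUG"),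
   ("W", "UGG"), ("Y", "UAU UAC")]

-- [[cs for a, cs in codon_table if a == aa][0].split() for aa in Protein]
-- [0] raises IndexError (excluded by Pre_) if aa is not in the table; .getD "" only totalises that access
def aaToCodonList_alt (Protein : String) : List (List String) :=
  Protein.toList.map (fun aa =>
    PySem.Str.split₀
      ((PySem.List.pyGet?
          (pvCodonTable.filterMap (fun p => if p.1 == String.ofList [aa] then some p.2 else none))
          0).getD ""))

-- ===== PRECONDITION & SPEC =====
-- Pre_ excludes exactly the inputs on which A raises KeyError (and B IndexError): proteins with a
-- character outside the 20 one-letter amino-acid codes occurring as single-letter values of trans_map.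
def Pre_aaToCodonList (Protein : String) : Prop :=
  (Protein.toList.all (fun c => decide (c ∈ ['F','L','S','Y','C','W','P','H','Q','R','I','M','T','N','K','V','A','D','E','G']))) = true
instance (Protein : String) : Decidable (Pre_aaToCodonList Protein) := by
  unfold Pre_aaToCodonList; infer_instance
def pvWitness_aaToCodonList : String := "MS"

def Spec_aaToCodonList (Protein : String) (out : List (List String)) : Prop := out = aaToCodonList_alt Protein
instance (Protein : String) (out : List (List String)) : Decidable (Spec_aaToCodonList Protein out) := by unfold Spec_aaToCodonList; infer_instance

-- ===== CLAIM (what is proved, stated in full; the proofs are below) =====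
def Claim_equal_aaToCodonList : Prop := ∀ (Protein : String), Dom_aaToCodonList Protein → Pre_aaToCodonList Protein → Spec_aaToCodonList Protein (aaToCodonList Protein)

-- ===== LEMMAS AND PROOFS =====

-- the reverse dictionary A's two construction loops produce, written out (proof-side helper)
def pvRevLit : PySem.Dict String (List String) := PySem.Dict.mk [("F", ["UUU", "UUC"]), ("L", ["UUA", "UUG", "CUU", "CUC", "CUA", "CUG"]), ("S", ["UCU", "UCC", "UCA", "UCG", "AGU", "AGC"]), ("Y", ["UAU", "UAC"]), ("STOP", ["UAA", "UAG", "UGA"]), ("C", ["UGU", "UGC"]), ("W", ["UGG"]), ("P", ["CCU", "CCC", "CCA", "CCG"]), ("H", ["CAU", "CAC"]), ("Q", ["CAA", "CAG"]), ("R", ["CGU", "CGC", "CGA", "CGG", "AGA", "AGG"]), ("I", ["AUU", "AUC", "AUA"]), ("M", ["AUG"]), ("T", ["ACU", "ACC", "ACA", "ACG"]), ("N", ["AAU", "AAC"]), ("K", ["AAA", "AAG"]), ("V", ["GUU", "GUC", "GUA", "GUG"]), ("A", ["GCU", "GCC", "GCA", "GCG"]), ("D", ["GAU", "GAC"]), ("E",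 ["GAA", "GAG"]), ("G", ["GGU", "GGC", "GGA", "GGG"])]

set_option maxRecDepth 100000 in
theorem pv_rev_eq :
    pvTransMap.items.foldl (fun d kv => d.modify kv.2 [] (fun l => l ++ [kv.1]))
      ((PySem.Set.ofList (PySem.Dict.values pvTransMap)).foldl
        (fun d k => d.insert k ([] : List String)) PySem.Dict.empty)
    = pvRevLit := by rfl

-- On each of the 20 admitted characters, A's reverse-dictionary lookup and B's table scan + split agree.
set_option maxRecDepth 100000 in
theorem pv_perChar : ∀ c ∈ ['F','L','S','Y','C','W','P','H','Q','R','I','M','T','N','K','V','A','D','E','G'],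
    (pvRevLit.getD (String.ofList [c]) [])
    = PySem.Str.split₀
        ((PySem.List.pyGet?
            (pvCodonTable.filterMap (fun p => if p.1 == String.ofList [c] then some p.2 else none))
            0).getD "") := by
  intro c hc
  fin_cases hc <;> rfl

-- ===== VERDICT (by name: the statement is the Claim_ definition above) =====
theorem aaToCodonList_spec : Claim_equal_aaToCodonList := by
  intro Protein _ hpre
  unfold Spec_aaToCodonList aaToCodonList aaToCodonList_alt
  rw [PySem.List.foldl_append_singleton_eq_map]
  refine List.map_congr_left (fun c hc => ?_)
  rw [pv_rev_eq]
  exact pv_perChar c (of_decide_eq_true (List.all_eq_true.mp hpre c hc))
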